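-- pv_equiv track=rewrite | github.com/patrickyi82/planner-ai-platform | planner_ai_platform/core/lint/lint_plan.py | _reachable_from_roots
-- ===== SOURCE A (Python) =====
-- from collections import Counter, defaultdict, deque
--
-- def _reachable_from_roots(roots: list[str], id_to_deps: dict[str, list[str]]) -> set[str]:
--     # dep -> list of nodes that depend on it
--     dependents: dict[str, list[str]] = defaultdict(list)
--     for nid, deps in id_to_deps.items():
--         for dep in deps:
--             if dep in id_to_deps:
--                 dependents[dep].append(nid)
--
--     q: deque[str] = deque(roots)
--     seen: set[str] = set()
--     while q:
--         cur = q.popleft()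
--         if cur in seen:
--             continue
--         seen.add(cur)
--         for nxt in dependents.get(cur, []):
--             if nxt not in seen:
--                 q.append(nxt)
--     return seen
-- ===== SOURCE B (Python) =====
-- def _reachable_from_roots(roots: list[str], id_to_deps: dict[str, list[str]]) -> set[str]:
--     # Worklist over an insertion-ordered list: no reverse dependents map, no deque;
--     # dependents of each processed node are found by scanning id_to_deps directly.
--     order: list[str] = []
--     seen: set[str] = set()
--     for r in roots:
--         if r not in seen:
--             seen.add(r)
--             order.append(r)
--     i = 0
--     while i < len(order):
--         cur = order[i]
--         i += 1
--         if cur in id_to_deps: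
--             for nid, deps in id_to_deps.items():
--                 if nid not in seen and cur in deps:
--                     seen.add(nid)
--                     order.append(nid)
--     return seen
-- ===== Notes on version B (the rewrite author's own statement) =====
-- stated objective: alternative
-- what changed: B drops A's precomputed reverse-dependents map and its deque (which may hold duplicate entries): it dedups the roots into an insertion-ordered worklist and, for each processed node, finds its dependents by scanning id_to_deps directly, appending unseen ones to the same list.
import Mathlib
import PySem

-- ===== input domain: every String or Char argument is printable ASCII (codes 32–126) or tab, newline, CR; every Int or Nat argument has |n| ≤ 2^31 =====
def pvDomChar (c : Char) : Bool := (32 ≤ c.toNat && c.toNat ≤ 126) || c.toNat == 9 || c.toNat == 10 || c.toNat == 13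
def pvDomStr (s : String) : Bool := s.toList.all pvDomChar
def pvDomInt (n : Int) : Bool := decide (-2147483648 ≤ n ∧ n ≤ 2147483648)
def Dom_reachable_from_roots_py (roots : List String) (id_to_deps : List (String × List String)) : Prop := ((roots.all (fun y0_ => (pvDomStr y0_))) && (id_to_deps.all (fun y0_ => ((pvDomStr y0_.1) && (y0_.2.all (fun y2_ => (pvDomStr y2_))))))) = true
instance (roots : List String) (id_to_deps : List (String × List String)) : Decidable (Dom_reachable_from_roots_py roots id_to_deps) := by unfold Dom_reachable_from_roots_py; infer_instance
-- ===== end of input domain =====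

-- B replaces A's precomputed reverse-dependents map and deque (with duplicate queue entries)
-- by a deduplicated insertion-ordered worklist whose dependents are found by scanning
-- id_to_deps directly (objective: alternative; same return value, no argument is mutated).

-- ===== PORT A =====
-- dependents: dict[str, list[str]] = defaultdict(list); for nid, deps in items: for dep in deps:
--   if dep in id_to_deps: dependents[dep].append(nid)
def pvBuildDependents (id_to_deps : List (String × List String)) : PySem.Dict String (List String) :=
  id_to_deps.foldl (fun d p =>
    p.2.foldl (fun d dep =>
      if (id_to_deps.map Prod.fst).contains dep then
        PySem.Dict.modify d dep [] (fun l => l ++ [p.1])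
      else d) d) PySem.Dict.empty

-- generic filter-length facts cited by both ports' termination measures
theorem pv_length_filter_le {α : Type} (l : List α) (p q : α → Bool)
    (h : ∀ x, q x = true → p x = true) :
    (l.filter q).length ≤ (l.filter p).length := by
  induction l with
  | nil => simp
  | cons x xs ih =>
    by_cases hq : q x = true
    · simp [hq, h x hq]; omega
    · simp only [Bool.not_eq_true] at hq
      simp only [List.filter_cons, hq]
      by_cases hp : p x = true <;> simp [hp] <;> omega

theorem pv_length_filter_lt {α : Type} (l : List α) (p q : α → Bool)
    (h : ∀ x, q x = true → p x = true) (a : α) (ha : a ∈ l)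
    (hpa : p a = true) (hqa : q a = false) :
    (l.filter q).length < (l.filter p).length := by
  induction l with
  | nil => simp at ha
  | cons x xs ih =>
    rcases List.mem_cons.mp ha with rfl | ha'
    · have hle := pv_length_filter_le xs p q h
      simp [hpa, hqa]
      omega
    · by_cases hq : q x = true
      · simp [hq, h x hq]
        exact ih ha'
      · have := ih ha'
        simp only [Bool.not_eq_true] at hq
        simp only [List.filter_cons, hq]
        by_cases hp : p x = true <;> simp [hp] <;> omega

theorem pv_getD_ne_nil_mem_keys (d : PySem.Dict String (List String)) (k : String)
    (h : PySem.Dict.getD d k [] ≠ []) : k ∈ d.keys := by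
  by_contra hk
  have hc : d.contains k = false := by
    cases hcc : d.contains k
    · rfl
    · exact absurd ((PySem.Dict.contains_iff_mem_keys d k).mp hcc) hk
  exact h (PySem.Dict.getD_of_not_contains d [] hc)

-- while q: cur = q.popleft(); if cur in seen: continue; seen.add(cur);
--   for nxt in dependents.get(cur, []): if nxt not in seen: q.append(nxt)
def pvBfsA (dependents : PySem.Dict String (List String)) :
    List String → PySem.Set String → List String
  | [], seen => seen
  | cur :: q, seen =>
    if PySem.Set.contains seen cur = true then
      pvBfsA dependents q seen
    else
      pvBfsA dependents
        (q ++ (PySem.Dict.getD dependents cur []).filter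
            (fun nxt => !(PySem.Set.contains (PySem.Set.add seen cur) nxt)))
        (PySem.Set.add seen cur)
  termination_by q seen =>
    ((dependents.keys.filter (fun x => !(seen.contains x))).length, q.length)
  decreasing_by
  · apply Prod.Lex.right; simp
  · rename_i h
    have hmem : cur ∉ seen := by
      intro hm
      exact h ((PySem.Set.contains_iff seen cur).mpr hm)
    have hadd : PySem.Set.add seen cur = seen ++ [cur] := PySem.Set.add_of_not_mem hmem
    have himp : ∀ x, (!((PySem.Set.add seen cur).contains x)) = true →
        (!(seen.contains x)) = true := by
      intro x hx
      simp [hadd, List.contains_eq_mem] at hx ⊢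
      exact fun hmx => hx.1 hmx
    by_cases hg : PySem.Dict.getD dependents cur [] = []
    · rw [hg]
      have hle := pv_length_filter_le dependents.keys
        (fun x => !(seen.contains x))
        (fun x => !((PySem.Set.add seen cur).contains x)) himp
      rcases lt_or_eq_of_le hle with hlt | heq
      · exact Prod.Lex.left _ _ hlt
      · rw [heq]; apply Prod.Lex.right; simp
    · apply Prod.Lex.left
      apply pv_length_filter_lt _ _ _ himp cur (pv_getD_ne_nil_mem_keys _ _ hg)
      · simp [List.contains_eq_mem, hmem]
      · simp [hadd, List.contains_eq_mem]

def reachable_from_roots_py (roots : List String) (id_to_deps : List (String × List String)) : List String :=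
  pvBfsA (pvBuildDependents id_to_deps) roots PySem.Set.empty

-- ===== PORT B =====
-- if cur in id_to_deps: for nid, deps in id_to_deps.items():
--   if nid not in seen and cur in deps: seen.add(nid); order.append(nid)
def pvStepB (id_to_deps : List (String × List String)) (cur : String)
    (order : List String) : List String :=
  if (id_to_deps.map Prod.fst).contains cur then
    id_to_deps.foldl (fun acc p =>
      if p.2.contains cur then PySem.Set.add acc p.1 else acc) order
  else order

-- cited by pvLoopB's termination proof: one scan only appends fresh keys
theorem pvStepB_spec (id_to_deps : List (String × List String)) (cur : String)
    (order : List String) :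
    ∃ new, pvStepB id_to_deps cur order = order ++ new ∧
      ∀ x ∈ new, x ∈ id_to_deps.map Prod.fst ∧ x ∉ order := by
  have aux : ∀ (l : List (String × List String)) (acc : List String),
      ∃ new, l.foldl (fun acc p =>
          if p.2.contains cur then PySem.Set.add acc p.1 else acc) acc = acc ++ new ∧
        ∀ x ∈ new, x ∈ l.map Prod.fst ∧ x ∉ acc := by
    intro l
    induction l with
    | nil => exact fun acc => ⟨[], by simp⟩
    | cons p l ih =>
      intro acc
      by_cases hp : p.2.contains cur = true
      · by_cases hm : p.1 ∈ acc
        · obtain ⟨new, h1, h2⟩ := ih acc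
          refine ⟨new, ?_, ?_⟩
          · rw [List.foldl_cons, if_pos hp, PySem.Set.add_of_mem hm]; exact h1
          · exact fun x hx => ⟨List.mem_cons_of_mem _ ((h2 x hx).1), (h2 x hx).2⟩
        · obtain ⟨new, h1, h2⟩ := ih (acc ++ [p.1])
          refine ⟨p.1 :: new, ?_, ?_⟩
          · rw [List.foldl_cons, if_pos hp, PySem.Set.add_of_not_mem hm, h1]; simp
          · intro x hx
            rcases List.mem_cons.mp hx with rfl | hx'
            · exact ⟨by simp, hm⟩
            · refine ⟨List.mem_cons_of_mem _ ((h2 x hx').1), fun hxa => (h2 x hx').2 ?_⟩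
              exact List.mem_append_left _ hxa
      · simp only [Bool.not_eq_true] at hp
        obtain ⟨new, h1, h2⟩ := ih acc
        refine ⟨new, by
          rw [List.foldl_cons, if_neg (show ¬(p.2.contains cur = true) by
            intro hcc
            simp only [List.contains_eq_mem] at hp hcc
            simp at hp hcc
            exact hp hcc)]
          exact h1, ?_⟩
        exact fun x hx => ⟨List.mem_cons_of_mem _ ((h2 x hx).1), (h2 x hx).2⟩
  unfold pvStepB
  by_cases hc : (id_to_deps.map Prod.fst).contains cur = true
  · rw [if_pos hc]; exact aux id_to_deps order
  · refine ⟨[], ?_, by simp⟩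
    rw [if_neg hc]; simp

-- the index loop 'i = 0; while i < len(order): cur = order[i]; i += 1; …' with the state
-- (order, i) represented as (done, todo) = (order[:i], order[i:]); seen = set(order)
def pvLoopB (id_to_deps : List (String × List String)) :
    List String → List String → List String
  | done, [] => done
  | done, cur :: rest =>
    pvLoopB id_to_deps (done ++ [cur])
      ((pvStepB id_to_deps cur (done ++ cur :: rest)).drop (done.length + 1))
  termination_by done todo =>
    (((id_to_deps.map Prod.fst).filter (fun x => !((done ++ todo).contains x))).length,
      todo.length)
  decreasing_by
  · obtain ⟨new, hstep, hnew⟩ := pvStepB_spec id_to_deps cur (done ++ cur :: rest)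
    have hdrop : ((done ++ cur :: rest) ++ new).drop (done.length + 1) = rest ++ new := by
      have : (done ++ cur :: rest) ++ new = (done ++ [cur]) ++ (rest ++ new) := by simp
      rw [this, show done.length + 1 = (done ++ [cur]).length by simp, List.drop_left]
    rw [hstep, hdrop]
    have hstate : (done ++ [cur]) ++ (rest ++ new) = (done ++ cur :: rest) ++ new := by simp
    rw [hstate]
    cases new with
    | nil =>
      simp only [List.append_nil]
      apply Prod.Lex.right; simp
    | cons y t =>
      apply Prod.Lex.left
      have hy := hnew y (by simp)
      have himp : ∀ x, (!(((done ++ cur :: rest) ++ y :: t).contains x)) = true →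
          (!((done ++ cur :: rest).contains x)) = true := by
        intro x hx
        simp [List.contains_eq_mem] at hx ⊢
        tauto
      apply pv_length_filter_lt _ _ _ himp y hy.1
      · have := hy.2
        simp [List.contains_eq_mem] at this ⊢
        tauto
      · simp [List.contains_eq_mem]

-- order = []; seen = set(); for r in roots: if r not in seen: seen.add(r); order.append(r)
def reachable_from_roots_py_alt (roots : List String) (id_to_deps : List (String × List String)) : List String :=
  pvLoopB id_to_deps [] (roots.foldl PySem.Set.add PySem.Set.empty)

-- ===== PRECONDITION & SPEC =====
def Spec_reachable_from_roots_py (roots : List String) (id_to_deps : List (String × List String)) (out : List String) : Prop := out = reachable_from_roots_py_alt roots id_to_deps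
instance (roots : List String) (id_to_deps : List (String × List String)) (out : List String) : Decidable (Spec_reachable_from_roots_py roots id_to_deps out) := by unfold Spec_reachable_from_roots_py; infer_instance

-- ===== CLAIM (what is proved, stated in full; the proofs are below) =====
def Claim_equal_reachable_from_roots_py : Prop := ∀ (roots : List String) (id_to_deps : List (String × List String)), Dom_reachable_from_roots_py roots id_to_deps → Spec_reachable_from_roots_py roots id_to_deps (reachable_from_roots_py roots id_to_deps)

-- ===== LEMMAS AND PROOFS =====

theorem pvLoopB_cons (id_to_deps : List (String × List String)) (done cur rest) :
    pvLoopB id_to_deps done (cur :: rest) =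
      pvLoopB id_to_deps (done ++ [cur])
        ((pvStepB id_to_deps cur (done ++ cur :: rest)).drop (done.length + 1)) := by
  rw [pvLoopB.eq_def]

-- relative dedup: the first occurrences of xs that are not already in s
def pvDR : List String → List String → List String
  | [], _ => []
  | x :: xs, s => if s.contains x then pvDR xs s else x :: pvDR xs (s ++ [x])

theorem pv_foldl_add_eq_append_dR (xs : List String) :
    ∀ s : List String, xs.foldl PySem.Set.add s = s ++ pvDR xs s := by
  induction xs with
  | nil => intro s; simp [pvDR]
  | cons x xs ih =>
    intro s
    by_cases hx : x ∈ s
    · rw [List.foldl_cons, PySem.Set.add_of_mem hx, ih s]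
      simp [pvDR, List.contains_eq_mem, hx]
    · rw [List.foldl_cons, PySem.Set.add_of_not_mem hx, ih (s ++ [x])]
      simp [pvDR, List.contains_eq_mem, hx]

theorem pv_dR_append (a : List String) :
    ∀ (b s : List String), pvDR (a ++ b) s = pvDR a s ++ pvDR b (s ++ pvDR a s) := by
  induction a with
  | nil => intro b s; simp [pvDR]
  | cons x a ih =>
    intro b s
    by_cases hx : x ∈ s
    · simp only [List.cons_append, pvDR, List.contains_eq_mem, hx, decide_true, if_true]
      exact ih b s
    · simp only [List.cons_append, pvDR, List.contains_eq_mem, hx, decide_false]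
      rw [ih b (s ++ [x])]
      simp

theorem pv_dR_filter (p : String → Bool) (l : List String) :
    ∀ s : List String, (∀ x, p x = false → x ∈ s) →
    pvDR (l.filter p) s = pvDR l s := by
  induction l with
  | nil => intro s _; simp
  | cons x l ih =>
    intro s h
    by_cases hp : p x = true
    · by_cases hx : x ∈ s
      · simp only [List.filter_cons, hp, if_true, pvDR, List.contains_eq_mem, hx,
          decide_true]
        exact ih s h
      · simp only [List.filter_cons, hp, if_true, pvDR, List.contains_eq_mem, hx,
          decide_false]
        rw [ih (s ++ [x]) (fun y hy => List.mem_append_left _ (h y hy))]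
        simp
    · simp only [Bool.not_eq_true] at hp
      have hx : x ∈ s := h x hp
      simp only [List.filter_cons, hp, Bool.false_eq_true, if_false, pvDR,
        List.contains_eq_mem, hx, decide_true, if_true]
      exact ih s h

theorem pv_build_inner (kc : String → Bool) (nid : String) (deps : List String) :
    ∀ (d : PySem.Dict String (List String)) (x : String),
    PySem.Dict.getD (deps.foldl (fun d dep =>
        if kc dep then PySem.Dict.modify d dep [] (fun l => l ++ [nid]) else d) d) x [] =
      PySem.Dict.getD d x [] ++
        (if kc x then ((deps.filter (fun dep => dep == x)).map (fun _ => nid)) else []) := by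
  induction deps with
  | nil => intro d x; simp
  | cons dep deps ih =>
    intro d x
    by_cases hk : kc dep = true
    · rw [List.foldl_cons, if_pos hk, ih]
      rw [PySem.Dict.getD_modify]
      by_cases hxd : x = dep
      · subst hxd
        simp [hk]
      · have : (dep == x) = false := by
          exact beq_eq_false_iff_ne.mpr (fun h => hxd h.symm)
        simp only [List.filter_cons, this, Bool.false_eq_true, if_false, if_neg hxd]
    · simp only [Bool.not_eq_true] at hk
      rw [List.foldl_cons, if_neg (show ¬(kc dep = true) by
        intro hcc; simp [hk] at hcc), ih]
      by_cases hkx : kc x = true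
      · have : (dep == x) = false := by
          cases hde : dep == x
          · rfl
          · have hdx : dep = x := eq_of_beq hde
            rw [hdx, hkx] at hk
            exact absurd hk (by simp)
        simp [this, hkx]
      · simp [hkx]

theorem pv_build_aux (kc : String → Bool) (l : List (String × List String)) :
    ∀ (d : PySem.Dict String (List String)) (x : String),
    PySem.Dict.getD (l.foldl (fun d p =>
        p.2.foldl (fun d dep =>
          if kc dep then PySem.Dict.modify d dep [] (fun v => v ++ [p.1]) else d) d) d) x [] =
      PySem.Dict.getD d x [] ++
        (if kc x then
          l.flatMap (fun p => (p.2.filter (fun dep => dep == x)).map (fun _ => p.1))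
        else []) := by
  induction l with
  | nil => intro d x; simp
  | cons p l ih =>
    intro d x
    rw [List.foldl_cons, ih, pv_build_inner]
    by_cases hkx : kc x = true <;> simp [hkx]

theorem pv_getD_build (id_to_deps : List (String × List String)) (x : String) :
    PySem.Dict.getD (pvBuildDependents id_to_deps) x [] =
      if (id_to_deps.map Prod.fst).contains x then
        id_to_deps.flatMap (fun p => (p.2.filter (fun dep => dep == x)).map (fun _ => p.1))
      else [] := by
  unfold pvBuildDependents
  rw [pv_build_aux (fun dep => (id_to_deps.map Prod.fst).contains dep) id_to_deps
    PySem.Dict.empty x]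
  simp

theorem pv_dR_replicate (k : Nat) (x : String) :
    ∀ s : List String,
    pvDR (List.replicate k x) s = if x ∈ s then [] else if k = 0 then [] else [x] := by
  induction k with
  | zero => intro s; by_cases hx : x ∈ s <;> simp [pvDR, hx]
  | succ k ih =>
    intro s
    by_cases hx : x ∈ s
    · simp [List.replicate_succ, pvDR, List.contains_eq_mem, hx, ih s]
    · simp [List.replicate_succ, pvDR, List.contains_eq_mem, hx, ih (s ++ [x])]

theorem pv_dR_chunks (cur : String) (l : List (String × List String)) :
    ∀ s : List String,
    pvDR (l.flatMap (fun p => (p.2.filter (fun dep => dep == cur)).map (fun _ => p.1))) s =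
      pvDR ((l.filter (fun p => p.2.contains cur)).map Prod.fst) s := by
  induction l with
  | nil => intro s; simp
  | cons p l ih =>
    intro s
    rw [List.flatMap_cons, pv_dR_append]
    have hchunk : (p.2.filter (fun dep => dep == cur)).map (fun _ => p.1) =
        List.replicate (p.2.filter (fun dep => dep == cur)).length p.1 := by
      simp
    by_cases hc : p.2.contains cur = true
    · have hne : (p.2.filter (fun dep => dep == cur)).length ≠ 0 := by
        simp only [List.contains_eq_mem, decide_eq_true_eq] at hc
        have : cur ∈ p.2.filter (fun dep => dep == cur) :=
          List.mem_filter.mpr ⟨hc, by simp⟩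
        intro h0
        rw [List.length_eq_zero_iff] at h0
        simp [h0] at this
      have hc' : cur ∈ p.2 := by simpa [List.contains_eq_mem] using hc
      by_cases hx : p.1 ∈ s
      · rw [hchunk, pv_dR_replicate]
        simp only [hx, if_true, List.append_nil]
        rw [ih s]
        simp [hc', pvDR, List.contains_eq_mem, hx]
      · rw [hchunk, pv_dR_replicate]
        simp only [hx, if_false, if_neg hne]
        rw [ih (s ++ [p.1])]
        simp [hc', pvDR, List.contains_eq_mem, hx]
    · have hfil : p.2.filter (fun dep => dep == cur) = [] := by
        rw [List.filter_eq_nil_iff]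
        intro dep hdep
        simp only [Bool.not_eq_true, beq_eq_false_iff_ne]
        intro hde
        subst hde
        simp [List.contains_eq_mem, hdep] at hc
      have hc' : cur ∉ p.2 := by
        intro hm
        rw [List.contains_eq_mem] at hc
        simp [hm] at hc
      rw [hchunk, hfil]
      simp only [List.length_nil, List.replicate_zero, pvDR, List.append_nil]
      rw [ih s]
      simp [hc']

theorem pv_stepB_eq (id_to_deps : List (String × List String)) (cur : String)
    (order : List String) :
    pvStepB id_to_deps cur order =
      if (id_to_deps.map Prod.fst).contains cur then
        order ++ pvDR ((id_to_deps.filter (fun p => p.2.contains cur)).map Prod.fst) order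
      else order := by
  have hfold : ∀ (l : List (String × List String)) (acc : List String),
      l.foldl (fun acc p => if p.2.contains cur then PySem.Set.add acc p.1 else acc) acc =
        ((l.filter (fun p => p.2.contains cur)).map Prod.fst).foldl PySem.Set.add acc := by
    intro l
    induction l with
    | nil => intro acc; simp
    | cons p l ih =>
      intro acc
      by_cases hp : p.2.contains cur = true
      · rw [List.foldl_cons, if_pos hp, ih, List.filter_cons, if_pos hp, List.map_cons,
          List.foldl_cons]
      · rw [List.foldl_cons, if_neg hp, ih, List.filter_cons, if_neg hp]
  unfold pvStepB
  by_cases hc : (id_to_deps.map Prod.fst).contains cur = true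
  · rw [if_pos hc, if_pos hc, hfold, pv_foldl_add_eq_append_dR]
  · rw [if_neg hc, if_neg hc]

theorem pv_main (id_to_deps : List (String × List String)) :
    ∀ (q : List String) (seen : PySem.Set String),
    pvBfsA (pvBuildDependents id_to_deps) q seen = pvLoopB id_to_deps seen (pvDR q seen) := by
  intro q seen
  induction q, seen using pvBfsA.induct (pvBuildDependents id_to_deps) with
  | case1 seen => simp [pvBfsA, pvDR, pvLoopB]
  | case2 cur q seen h ih =>
    rw [pvBfsA, if_pos h]
    have hmem : cur ∈ seen := (PySem.Set.contains_iff seen cur).mp h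
    simp only [pvDR, List.contains_eq_mem, hmem, decide_true, if_true]
    exact ih
  | case3 cur q seen h ih =>
    have hmem : cur ∉ seen := fun hm => h ((PySem.Set.contains_iff seen cur).mpr hm)
    have hadd : PySem.Set.add seen cur = seen ++ [cur] := PySem.Set.add_of_not_mem hmem
    rw [pvBfsA, if_neg h]
    simp only [pvDR, List.contains_eq_mem, hmem, decide_false, Bool.false_eq_true, if_false]
    set rest := pvDR q (seen ++ [cur]) with hrest
    rw [pvLoopB_cons]
    have horder : seen ++ cur :: rest = (seen ++ [cur]) ++ rest := by simp
    rw [pv_stepB_eq]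
    by_cases hk : (id_to_deps.map Prod.fst).contains cur = true
    · rw [if_pos hk]
      have hdrop : ((seen ++ cur :: rest) ++
          pvDR ((id_to_deps.filter (fun p => p.2.contains cur)).map Prod.fst)
            (seen ++ cur :: rest)).drop (seen.length + 1) =
          rest ++ pvDR ((id_to_deps.filter (fun p => p.2.contains cur)).map Prod.fst)
            (seen ++ cur :: rest) := by
        rw [show (seen ++ cur :: rest) ++
            pvDR ((id_to_deps.filter (fun p => p.2.contains cur)).map Prod.fst)
              (seen ++ cur :: rest) =
            (seen ++ [cur]) ++ (rest ++
              pvDR ((id_to_deps.filter (fun p => p.2.contains cur)).map Prod.fst)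
                (seen ++ cur :: rest)) by simp,
          show seen.length + 1 = (seen ++ [cur]).length by simp, List.drop_left]
      rw [hdrop]
      rw [ih, hadd]
      congr 1
      rw [pv_dR_append]
      congr 1
      · rw [pv_getD_build, if_pos hk]
        rw [pv_dR_filter]
        · rw [pv_dR_chunks]
          congr 1
          rw [← hrest, ← horder]
        · intro x hx
          simp [List.contains_eq_mem] at hx
          simp
          tauto
    · rw [if_neg hk]
      have hg : PySem.Dict.getD (pvBuildDependents id_to_deps) cur [] = [] := by
        rw [pv_getD_build, if_neg hk]
      rw [hg] at ih ⊢
      simp only [List.filter_nil, List.append_nil] at ih ⊢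
      rw [ih, hadd]
      congr 1
      rw [show (seen ++ cur :: rest).drop (seen.length + 1) = rest by
        rw [horder, show seen.length + 1 = (seen ++ [cur]).length by simp, List.drop_left]]

-- ===== VERDICT (by name: the statement is the Claim_ definition above) =====
theorem reachable_from_roots_py_spec : Claim_equal_reachable_from_roots_py := by
  intro roots id_to_deps _
  unfold Spec_reachable_from_roots_py reachable_from_roots_py reachable_from_roots_py_alt
  rw [pv_main id_to_deps roots PySem.Set.empty, pv_foldl_add_eq_append_dR]
  rfl
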